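-- pv_equiv track=rewrite | github.com/ArgusV-SDGP/ArgusV | argusv/src/api/routes/zones.py | _normalize_optional_str_list
-- ===== SOURCE A (Python) =====
-- from typing import Any, Literal, Optional
--
-- def _normalize_optional_str_list(values: Optional[list[str]]) -> Optional[list[str]]:
--     if values is None:
--         return None
--
--     normalized: list[str] = []
--     seen: set[str] = set()
--     for raw in values:
--         item = str(raw).strip().lower()
--         if not item or item in seen:
--             continue
--         seen.add(item)
--         normalized.append(item)
--     return normalized
-- ===== SOURCE B (Python) =====
-- from typing import Optional
--
--
-- def _normalize_optional_str_list(values: Optional[list[str]]) -> Optional[list[str]]: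
--     if values is None:
--         return None
--     result: list[str] = []
--     work = [str(v).strip().lower() for v in values]
--     # dedup by deletion: repeatedly take the front item and delete ALL of its
--     # later occurrences from the working list; no seen-set, no membership test
--     while work:
--         head = work[0]
--         work = [x for x in work[1:] if x != head]
--         if head:
--             result.append(head)
--     return result
-- ===== Notes on version B (the rewrite author's own statement) =====
-- stated objective: alternative
-- what changed: Replaces the seen-set loop (skip item if already in a set) by dedup-by-deletion: normalize all items first, then repeatedly take the front of the working list and delete all its later occurrences, so no seen set or membership branch exists at all.
import Mathlib
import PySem

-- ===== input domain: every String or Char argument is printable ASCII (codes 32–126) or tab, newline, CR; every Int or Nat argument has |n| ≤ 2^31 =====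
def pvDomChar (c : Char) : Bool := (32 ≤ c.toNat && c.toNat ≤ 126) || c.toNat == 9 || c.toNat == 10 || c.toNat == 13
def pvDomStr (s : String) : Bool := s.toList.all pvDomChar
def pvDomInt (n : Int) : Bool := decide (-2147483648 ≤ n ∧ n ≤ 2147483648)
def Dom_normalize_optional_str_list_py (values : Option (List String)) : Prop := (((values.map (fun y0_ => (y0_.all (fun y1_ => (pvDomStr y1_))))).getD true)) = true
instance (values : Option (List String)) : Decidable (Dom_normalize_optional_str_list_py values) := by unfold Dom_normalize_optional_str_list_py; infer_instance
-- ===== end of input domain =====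

set_option maxHeartbeats 1600000

-- B replaces A's seen-set loop by dedup-by-deletion (take front, delete its later occurrences); alternative algorithm, same results.

-- ===== PORT A =====
def normalize_optional_str_list_py (values : Option (List String)) : Option (List String) :=
  match values with
  | none => none
  | some vs =>
    -- for raw in values: item = str(raw).strip().lower(); skip empty/seen; else add to seen and append
    let st := vs.foldl
      (fun (acc : List String × PySem.Set String) raw =>
        let item := PySem.Str.lower (PySem.Str.strip raw)
        if item = "" ∨ item ∈ acc.2 then acc
        else (acc.1 ++ [item], acc.2.add item))
      ([], PySem.Set.empty)
    some st.1

-- ===== PORT B =====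
-- Source B's while-loop over the shrinking working list, as the corresponding recursion:
-- take the front item, delete all its later occurrences, keep it if non-empty.
def pvNubWork : List String → List String
  | [] => []
  | head :: t =>
      if head = "" then pvNubWork (t.filter (fun x => x ≠ head))
      else head :: pvNubWork (t.filter (fun x => x ≠ head))
  termination_by l => l.length
  decreasing_by all_goals
    simpa using Nat.lt_succ_of_le (le_trans (List.length_filter_le _ _) (le_of_eq List.length_attach))

def normalize_optional_str_list_py_alt (values : Option (List String)) : Option (List String) :=
  match values with
  | none => none
  | some vs =>
    some (pvNubWork (vs.map (fun v => PySem.Str.lower (PySem.Str.strip v))))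

-- ===== PRECONDITION & SPEC =====
def Spec_normalize_optional_str_list_py (values : Option (List String)) (out : Option (List String)) : Prop := out = normalize_optional_str_list_py_alt values
instance (values : Option (List String)) (out : Option (List String)) : Decidable (Spec_normalize_optional_str_list_py values out) := by unfold Spec_normalize_optional_str_list_py; infer_instance

-- ===== CLAIM (what is proved, stated in full; the proofs are below) =====
def Claim_equal_normalize_optional_str_list_py : Prop := ∀ (values : Option (List String)), Dom_normalize_optional_str_list_py values → Spec_normalize_optional_str_list_py values (normalize_optional_str_list_py values)

-- ===== LEMMAS AND PROOFS =====

theorem pvNubWork_nil : pvNubWork [] = [] := by simp [pvNubWork]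

theorem pvNubWork_cons (h : String) (t : List String) :
    pvNubWork (h :: t) = if h = "" then pvNubWork (t.filter (fun x => x ≠ h))
      else h :: pvNubWork (t.filter (fun x => x ≠ h)) := by
  rw [pvNubWork]

-- pvNubWork ignores empty strings: erasing them first changes nothing
theorem pvNubWork_filter_ne_empty (m : Nat) :
    ∀ (l : List String), l.length ≤ m →
    pvNubWork (l.filter (fun x => x ≠ "")) = pvNubWork l := by
  induction m with
  | zero =>
    intro l hl
    have : l = [] := List.eq_nil_of_length_eq_zero (Nat.le_zero.mp hl)
    subst this; simp
  | succ m ihm =>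
    intro l hl
    cases l with
    | nil => simp
    | cons h t =>
      have ht : t.length ≤ m := Nat.lt_succ_iff.mp (by simpa using hl)
      by_cases hh : h = ""
      · subst hh
        have h1 : ((("" : String) :: t).filter (fun x => x ≠ "")) = t.filter (fun x => x ≠ "") := by
          simp
        rw [h1, pvNubWork_cons, if_pos rfl]
      · have h1 : ((h :: t).filter (fun x => x ≠ "")) = h :: (t.filter (fun x => x ≠ "")) := by
          simp [hh]
        rw [h1, pvNubWork_cons, if_neg hh, pvNubWork_cons, if_neg hh]
        have hcomm : (t.filter (fun x => x ≠ "")).filter (fun x => x ≠ h)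
            = (t.filter (fun x => x ≠ h)).filter (fun x => x ≠ "") := by
          rw [List.filter_filter, List.filter_filter]
          exact List.filter_congr (fun x _ => Bool.and_comm _ _)
        rw [hcomm]
        exact congrArg (List.cons h) (ihm _ (le_trans (List.length_filter_le _ _) ht))

-- A's seen-set loop with seen-set u appends exactly pvNubWork of the cleaned items not already in u.
theorem pv_loop (n : Nat) :
    ∀ (vs : List String), vs.length ≤ n → ∀ (acc u : List String),
    (vs.foldl
      (fun (acc : List String × PySem.Set String) raw =>
        let item := PySem.Str.lower (PySem.Str.strip raw)
        if item = "" ∨ item ∈ acc.2 then acc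
        else (acc.1 ++ [item], acc.2.add item))
      (acc, u)).1
    = acc ++ pvNubWork ((vs.map (fun v => PySem.Str.lower (PySem.Str.strip v))).filter
        (fun x => ¬ x ∈ u)) := by
  induction n with
  | zero =>
    intro vs hvs acc u
    have : vs = [] := List.eq_nil_of_length_eq_zero (Nat.le_zero.mp hvs)
    subst this; simp [pvNubWork_nil]
  | succ n ih =>
    intro vs hvs acc u
    cases vs with
    | nil => simp [pvNubWork_nil]
    | cons r rest =>
      have hr : rest.length ≤ n := Nat.lt_succ_iff.mp (by simpa using hvs)
      by_cases hcu : PySem.Str.lower (PySem.Str.strip r) ∈ u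
      · have hstep : (let item := PySem.Str.lower (PySem.Str.strip r);
            if item = "" ∨ item ∈ ((acc, u) : List String × PySem.Set String).2 then (acc, u)
            else ((acc, u).1 ++ [item], PySem.Set.add (acc, u).2 item))
            = ((acc, u) : List String × PySem.Set String) := by
          simp [hcu]
        rw [List.foldl_cons, hstep, ih rest hr acc u]
        have hfl : (((r :: rest).map (fun v => PySem.Str.lower (PySem.Str.strip v))).filter
              (fun x => ¬ x ∈ u))
            = ((rest.map (fun v => PySem.Str.lower (PySem.Str.strip v))).filter
              (fun x => ¬ x ∈ u)) := by
          simp [hcu]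
        rw [hfl]
      · by_cases he : PySem.Str.lower (PySem.Str.strip r) = ""
        · have hcu' : ("" : String) ∉ u := he ▸ hcu
          have hstep : (let item := PySem.Str.lower (PySem.Str.strip r);
              if item = "" ∨ item ∈ ((acc, u) : List String × PySem.Set String).2 then (acc, u)
              else ((acc, u).1 ++ [item], PySem.Set.add (acc, u).2 item))
              = ((acc, u) : List String × PySem.Set String) := by
            simp [he]
          rw [List.foldl_cons, hstep, ih rest hr acc u]
          have hfl : (((r :: rest).map (fun v => PySem.Str.lower (PySem.Str.strip v))).filter
                (fun x => ¬ x ∈ u))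
              = "" :: ((rest.map (fun v => PySem.Str.lower (PySem.Str.strip v))).filter
                (fun x => ¬ x ∈ u)) := by
            simp [he, hcu']
          rw [hfl, pvNubWork_cons, if_pos rfl]
          exact congrArg (fun l => acc ++ l) (pvNubWork_filter_ne_empty _ _ le_rfl).symm
        · have hadd : PySem.Set.add u (PySem.Str.lower (PySem.Str.strip r))
              = u ++ [PySem.Str.lower (PySem.Str.strip r)] := by
            simp [PySem.Set.add, PySem.Set.contains, hcu]
          have hstep : (let item := PySem.Str.lower (PySem.Str.strip r);
              if item = "" ∨ item ∈ ((acc, u) : List String × PySem.Set String).2 then (acc, u)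
              else ((acc, u).1 ++ [item], PySem.Set.add (acc, u).2 item))
              = ((acc ++ [PySem.Str.lower (PySem.Str.strip r)],
                  u ++ [PySem.Str.lower (PySem.Str.strip r)]) : List String × PySem.Set String) := by
            simp [he, hcu, PySem.Set.add, PySem.Set.contains]
          rw [List.foldl_cons, hstep,
            ih rest hr (acc ++ [PySem.Str.lower (PySem.Str.strip r)])
              (u ++ [PySem.Str.lower (PySem.Str.strip r)])]
          have hfl : (((r :: rest).map (fun v => PySem.Str.lower (PySem.Str.strip v))).filter
                (fun x => ¬ x ∈ u))
              = PySem.Str.lower (PySem.Str.strip r)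
                :: ((rest.map (fun v => PySem.Str.lower (PySem.Str.strip v))).filter
                (fun x => ¬ x ∈ u)) := by
            simp [hcu]
          rw [hfl, pvNubWork_cons, if_neg he]
          have harg : ((rest.map (fun v => PySem.Str.lower (PySem.Str.strip v))).filter
                (fun x => ¬ x ∈ u)).filter (fun x => x ≠ PySem.Str.lower (PySem.Str.strip r))
              = (rest.map (fun v => PySem.Str.lower (PySem.Str.strip v))).filter
                (fun x => ¬ x ∈ u ++ [PySem.Str.lower (PySem.Str.strip r)]) := by
            rw [List.filter_filter]
            exact List.filter_congr (fun x _ => by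
              by_cases hx : x ∈ u <;> by_cases hxc : x = PySem.Str.lower (PySem.Str.strip r) <;>
                simp [hx, hxc])
          rw [harg, List.append_assoc]
          rfl

-- ===== VERDICT (by name: the statement is the Claim_ definition above) =====
theorem normalize_optional_str_list_py_spec : Claim_equal_normalize_optional_str_list_py := by
  intro values _
  unfold Spec_normalize_optional_str_list_py
  cases values with
  | none => rfl
  | some vs =>
    simp only [normalize_optional_str_list_py, normalize_optional_str_list_py_alt]
    have h := pv_loop vs.length vs le_rfl [] []
    simp only [List.not_mem_nil, not_false_iff, decide_true, List.filter_true, List.nil_append] at h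
    simp only [PySem.Set.empty]
    rw [h]
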